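/-
  THE BASE'S BYTES IN A PROGRAM'S IMAGE: one closed fact per image, the slices proved once.

  c/build.sh compares the base's two byte ranges of every image it links with the frozen reference (`base/ref/*.bin`). The Lean
  side of the same check: an image whose file is the number `N` (`sz` bytes) CONTAINS THE BASE when

      BaseIn N sz   :=   FileHas N sz 100000H baseTextNat.size baseTextNat      (the 20,480 bytes from 100000H are the base's text)

  — ONE kernel-decided equality per image (`by decide +kernel`). From it, for every function of the base,

      FileHas N sz entry size code        (`FileHas.slice`: a slice of a slice; the slice of `baseTextNat` itself is a closed fact
                                           about the BASE, decided once, here: `baseHas_<function>`)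

  and so `Closed.AllCode (startLayout c hc) (startU im c inp)` for the 42 proved base functions (34 of runtime + libc + libm, 8 of the heap: base version 2) (`allCode_of_baseIn`), plus the three
  base functions whose units are the program's (`_start`, `run_ctors`, `__asan_register_globals`: `code_start_of_baseIn` …).
-/
import ProgX.ImageFacts
import ProgX.Base.BaseImage
import ProgX.Base.Closed
namespace ProgX.Base
open X86 X86.User Asan

set_option exponentiation.threshold 2000000

/-- **A slice of a slice of the file**: if the file has `M` (`n` bytes) at `a`, and the `k` bytes at offset `off` of `M` are `K`,
then the file has `K` at `a + off`. -/
theorem FileHas.slice {N sz a n M : Nat} (h : FileHas N sz a n M) (off k K : Nat) (hfit : off + k ≤ n)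
    (hK : (M >>> (8 * off)) % 2 ^ (8 * k) = K) : FileHas N sz (a + off) k K := by
  obtain ⟨h1, h2, h3⟩ := h
  refine ⟨by omega, by omega, ?_⟩
  rw [← hK, ← h3]
  have e1 : 8 * (a + off - 0x100000) = 8 * (a - 0x100000) + 8 * off := by omega
  rw [e1, Nat.shiftRight_add]
  generalize N >>> (8 * (a - 0x100000)) = x
  -- (x % 2^(8n)) >>> (8 off) % 2^(8k) = x >>> (8 off) % 2^(8k), since 8 off + 8 k ≤ 8 n
  rw [Nat.shiftRight_eq_div_pow, Nat.shiftRight_eq_div_pow]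
  have e2 : 8 * off + (8 * n - 8 * off) = 8 * n := by omega
  have hsplit : 2 ^ (8 * n) = 2 ^ (8 * off) * 2 ^ (8 * n - 8 * off) := by
    rw [← Nat.pow_add, e2]
  rw [hsplit, Nat.mod_mul_right_div_self]
  apply (Nat.mod_mod_of_dvd _ _).symm
  apply Nat.pow_dvd_pow
  omega

/-- **The image contains the base's text**: the 20,480 bytes from 100000H are `baseTextNat`. -/
abbrev BaseIn (N sz : Nat) : Prop := FileHas N sz 0x100000 baseTextNat.size baseTextNat

/-- The bytes of one base function inside the base's text: a closed fact about the base. -/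
abbrev BaseHas (entry : Word) (size code : Nat) : Prop :=
  entry.toNat - 0x100000 + size ≤ baseTextNat.size ∧ 0x100000 ≤ entry.toNat ∧
    (baseTextNat >>> (8 * (entry.toNat - 0x100000))) % 2 ^ (8 * size) = code

/-- A function of the base is in every image that contains the base. -/
theorem fileHas_of_baseIn {N sz : Nat} (hb : BaseIn N sz) {entry : Word} {size code : Nat} (h : BaseHas entry size code) :
    FileHas N sz entry.toNat size code := by
  obtain ⟨hfit, hlo, hK⟩ := h
  have hs := FileHas.slice hb (entry.toNat - 0x100000) size code hfit hK
  have e : 0x100000 + (entry.toNat - 0x100000) = entry.toNat := by omega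
  rw [e] at hs
  exact hs

/-- **The code of a base function is in the start state of every image that contains the base.** -/
theorem hasCode_of_baseIn {im : Image} {N sz : Nat} (hI : ImageIsNat im N sz) (hb : BaseIn N sz) (c : Nat) (hc : c = 0 ∨ c = 3)
    (inp : List UInt8) {entry : Word} {size code : Nat} (h : BaseHas entry size code) :
    HasCodeNat (startLayout c hc) (startU im c inp) entry code size :=
  image_hasCode hI c hc inp entry code size (fileHas_of_baseIn hb h)

end ProgX.Base

namespace ProgX.Base
open X86 X86.User Asan

set_option exponentiation.threshold 2000000

/-! ### The functions of the base inside the base's text (GENERATED by tools/mkimagefacts.py from the fields of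
`Closed.AllCode`: one closed fact each) -/

/-- The bytes of `abs` inside the base's text. -/
theorem baseHas_abs : BaseHas ProgX.Base.L.abs.entry ProgX.Base.L.abs.size ProgX.Base.Code.code_abs.nat := by decide +kernel

/-- The bytes of `arena_poison` inside the base's text. -/
theorem baseHas_arena_poison : BaseHas ProgX.Base.L.arena_poison.entry ProgX.Base.L.arena_poison.size ProgX.Base.Code.code_arena_poison.nat := by decide +kernel

/-- The bytes of `arena_unpoison` inside the base's text. -/
theorem baseHas_arena_unpoison : BaseHas ProgX.Base.L.arena_unpoison.entry ProgX.Base.L.arena_unpoison.size ProgX.Base.Code.code_arena_unpoison.nat := by decide +kernel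

/-- The bytes of `asan_load1_noabort` inside the base's text. -/
theorem baseHas_asan_load1_noabort : BaseHas ProgX.Base.L.__asan_load1_noabort.entry ProgX.Base.L.__asan_load1_noabort.size ProgX.Base.Code.code___asan_load1_noabort.nat := by decide +kernel

/-- The bytes of `asan_load2_noabort` inside the base's text. -/
theorem baseHas_asan_load2_noabort : BaseHas ProgX.Base.L.__asan_load2_noabort.entry ProgX.Base.L.__asan_load2_noabort.size ProgX.Base.Code.code___asan_load2_noabort.nat := by decide +kernel

/-- The bytes of `asan_load4_noabort` inside the base's text. -/
theorem baseHas_asan_load4_noabort : BaseHas ProgX.Base.L.__asan_load4_noabort.entry ProgX.Base.L.__asan_load4_noabort.size ProgX.Base.Code.code___asan_load4_noabort.nat := by decide +kernel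

/-- The bytes of `asan_load8_noabort` inside the base's text. -/
theorem baseHas_asan_load8_noabort : BaseHas ProgX.Base.L.__asan_load8_noabort.entry ProgX.Base.L.__asan_load8_noabort.size ProgX.Base.Code.code___asan_load8_noabort.nat := by decide +kernel

/-- The bytes of `asan_store1_noabort` inside the base's text. -/
theorem baseHas_asan_store1_noabort : BaseHas ProgX.Base.L.__asan_store1_noabort.entry ProgX.Base.L.__asan_store1_noabort.size ProgX.Base.Code.code___asan_store1_noabort.nat := by decide +kernel

/-- The bytes of `asan_store2_noabort` inside the base's text. -/
theorem baseHas_asan_store2_noabort : BaseHas ProgX.Base.L.__asan_store2_noabort.entry ProgX.Base.L.__asan_store2_noabort.size ProgX.Base.Code.code___asan_store2_noabort.nat := by decide +kernel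

/-- The bytes of `asan_store4_noabort` inside the base's text. -/
theorem baseHas_asan_store4_noabort : BaseHas ProgX.Base.L.__asan_store4_noabort.entry ProgX.Base.L.__asan_store4_noabort.size ProgX.Base.Code.code___asan_store4_noabort.nat := by decide +kernel

/-- The bytes of `asan_store8_noabort` inside the base's text. -/
theorem baseHas_asan_store8_noabort : BaseHas ProgX.Base.L.__asan_store8_noabort.entry ProgX.Base.L.__asan_store8_noabort.size ProgX.Base.Code.code___asan_store8_noabort.nat := by decide +kernel

/-- The bytes of `cos_poly` inside the base's text. -/
theorem baseHas_cos_poly : BaseHas ProgX.Base.L.cos_poly.entry ProgX.Base.L.cos_poly.size ProgX.Base.Code.code_cos_poly.nat := by decide +kernel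

/-- The bytes of `floor` inside the base's text. -/
theorem baseHas_floor : BaseHas ProgX.Base.L.floor.entry ProgX.Base.L.floor.size ProgX.Base.Code.code_floor.nat := by decide +kernel

/-- The bytes of `heap_alloc` inside the base's text. -/
theorem baseHas_heap_alloc : BaseHas ProgX.Base.L.heap_alloc.entry ProgX.Base.L.heap_alloc.size ProgX.Base.Code.code_heap_alloc.nat := by decide +kernel

/-- The bytes of `heap_live_size` inside the base's text. -/
theorem baseHas_heap_live_size : BaseHas ProgX.Base.L.heap_live_size.entry ProgX.Base.L.heap_live_size.size ProgX.Base.Code.code_heap_live_size.nat := by decide +kernel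

/-- The bytes of `heap_product_ok` inside the base's text. -/
theorem baseHas_heap_product_ok : BaseHas ProgX.Base.L.heap_product_ok.entry ProgX.Base.L.heap_product_ok.size ProgX.Base.Code.code_heap_product_ok.nat := by decide +kernel

/-- The bytes of `malloc` inside the base's text. -/
theorem baseHas_malloc : BaseHas ProgX.Base.L.malloc.entry ProgX.Base.L.malloc.size ProgX.Base.Code.code_malloc.nat := by decide +kernel

/-- The bytes of `memcmp` inside the base's text. -/
theorem baseHas_memcmp : BaseHas ProgX.Base.L.memcmp.entry ProgX.Base.L.memcmp.size ProgX.Base.Code.code_memcmp.nat := by decide +kernel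

/-- The bytes of `memcpy` inside the base's text. -/
theorem baseHas_memcpy : BaseHas ProgX.Base.L.memcpy.entry ProgX.Base.L.memcpy.size ProgX.Base.Code.code_memcpy.nat := by decide +kernel

/-- The bytes of `memset` inside the base's text. -/
theorem baseHas_memset : BaseHas ProgX.Base.L.memset.entry ProgX.Base.L.memset.size ProgX.Base.Code.code_memset.nat := by decide +kernel

/-- The bytes of `pow_int` inside the base's text. -/
theorem baseHas_pow_int : BaseHas ProgX.Base.L.pow_int.entry ProgX.Base.L.pow_int.size ProgX.Base.Code.code_pow_int.nat := by decide +kernel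

/-- The bytes of `range_bad` inside the base's text. -/
theorem baseHas_range_bad : BaseHas ProgX.Base.L.range_bad.entry ProgX.Base.L.range_bad.size ProgX.Base.Code.code_range_bad.nat := by decide +kernel

/-- The bytes of `sin_poly` inside the base's text. -/
theorem baseHas_sin_poly : BaseHas ProgX.Base.L.sin_poly.entry ProgX.Base.L.sin_poly.size ProgX.Base.Code.code_sin_poly.nat := by decide +kernel

/-- The bytes of `sincos_quadrant` inside the base's text. -/
theorem baseHas_sincos_quadrant : BaseHas ProgX.Base.L.sincos_quadrant.entry ProgX.Base.L.sincos_quadrant.size ProgX.Base.Code.code_sincos_quadrant.nat := by decide +kernel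

/-- The bytes of `swap_bytes` inside the base's text. -/
theorem baseHas_swap_bytes : BaseHas ProgX.Base.L.swap_bytes.entry ProgX.Base.L.swap_bytes.size ProgX.Base.Code.code_swap_bytes.nat := by decide +kernel

/-- The bytes of `two_to` inside the base's text. -/
theorem baseHas_two_to : BaseHas ProgX.Base.L.two_to.entry ProgX.Base.L.two_to.size ProgX.Base.Code.code_two_to.nat := by decide +kernel

/-- The bytes of `asan_load16_noabort` inside the base's text. -/
theorem baseHas_asan_load16_noabort : BaseHas ProgX.Base.L.__asan_load16_noabort.entry ProgX.Base.L.__asan_load16_noabort.size ProgX.Base.Code.code___asan_load16_noabort.nat := by decide +kernel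

/-- The bytes of `asan_loadN_noabort` inside the base's text. -/
theorem baseHas_asan_loadN_noabort : BaseHas ProgX.Base.L.__asan_loadN_noabort.entry ProgX.Base.L.__asan_loadN_noabort.size ProgX.Base.Code.code___asan_loadN_noabort.nat := by decide +kernel

/-- The bytes of `asan_store16_noabort` inside the base's text. -/
theorem baseHas_asan_store16_noabort : BaseHas ProgX.Base.L.__asan_store16_noabort.entry ProgX.Base.L.__asan_store16_noabort.size ProgX.Base.Code.code___asan_store16_noabort.nat := by decide +kernel

/-- The bytes of `asan_storeN_noabort` inside the base's text. -/
theorem baseHas_asan_storeN_noabort : BaseHas ProgX.Base.L.__asan_storeN_noabort.entry ProgX.Base.L.__asan_storeN_noabort.size ProgX.Base.Code.code___asan_storeN_noabort.nat := by decide +kernel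

/-- The bytes of `calloc` inside the base's text. -/
theorem baseHas_calloc : BaseHas ProgX.Base.L.calloc.entry ProgX.Base.L.calloc.size ProgX.Base.Code.code_calloc.nat := by decide +kernel

/-- The bytes of `cos` inside the base's text. -/
theorem baseHas_cos : BaseHas ProgX.Base.L.cos.entry ProgX.Base.L.cos.size ProgX.Base.Code.code_cos.nat := by decide +kernel

/-- The bytes of `free` inside the base's text. -/
theorem baseHas_free : BaseHas ProgX.Base.L.free.entry ProgX.Base.L.free.size ProgX.Base.Code.code_free.nat := by decide +kernel

/-- The bytes of `ldexp` inside the base's text. -/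
theorem baseHas_ldexp : BaseHas ProgX.Base.L.ldexp.entry ProgX.Base.L.ldexp.size ProgX.Base.Code.code_ldexp.nat := by decide +kernel

/-- The bytes of `log` inside the base's text. -/
theorem baseHas_log : BaseHas ProgX.Base.L.log.entry ProgX.Base.L.log.size ProgX.Base.Code.code_log.nat := by decide +kernel

/-- The bytes of `realloc` inside the base's text. -/
theorem baseHas_realloc : BaseHas ProgX.Base.L.realloc.entry ProgX.Base.L.realloc.size ProgX.Base.Code.code_realloc.nat := by decide +kernel

/-- The bytes of `reallocarray` inside the base's text. -/
theorem baseHas_reallocarray : BaseHas ProgX.Base.L.reallocarray.entry ProgX.Base.L.reallocarray.size ProgX.Base.Code.code_reallocarray.nat := by decide +kernel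

/-- The bytes of `sift_down` inside the base's text. -/
theorem baseHas_sift_down : BaseHas ProgX.Base.L.sift_down.entry ProgX.Base.L.sift_down.size ProgX.Base.Code.code_sift_down.nat := by decide +kernel

/-- The bytes of `sin` inside the base's text. -/
theorem baseHas_sin : BaseHas ProgX.Base.L.sin.entry ProgX.Base.L.sin.size ProgX.Base.Code.code_sin.nat := by decide +kernel

/-- The bytes of `exp` inside the base's text. -/
theorem baseHas_exp : BaseHas ProgX.Base.L.exp.entry ProgX.Base.L.exp.size ProgX.Base.Code.code_exp.nat := by decide +kernel

/-- The bytes of `pow` inside the base's text. -/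
theorem baseHas_pow : BaseHas ProgX.Base.L.pow.entry ProgX.Base.L.pow.size ProgX.Base.Code.code_pow.nat := by decide +kernel

/-- The bytes of `qsort` inside the base's text. -/
theorem baseHas_qsort : BaseHas ProgX.Base.L.qsort.entry ProgX.Base.L.qsort.size ProgX.Base.Code.code_qsort.nat := by decide +kernel

/-- The bytes of `start` inside the base's text. -/
theorem baseHas_start : BaseHas ProgX.Base.L._start.entry ProgX.Base.L._start.size ProgX.Base.Code.code__start.nat := by decide +kernel

/-- The bytes of `run_ctors` inside the base's text. -/
theorem baseHas_run_ctors : BaseHas ProgX.Base.L.run_ctors.entry ProgX.Base.L.run_ctors.size ProgX.Base.Code.code_run_ctors.nat := by decide +kernel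

/-- The bytes of `asan_register_globals` inside the base's text. -/
theorem baseHas_asan_register_globals : BaseHas ProgX.Base.L.__asan_register_globals.entry ProgX.Base.L.__asan_register_globals.size ProgX.Base.Code.code___asan_register_globals.nat := by decide +kernel

/-- **The code of the 42 proved base functions is in the start state of every image that contains the base.** -/
theorem allCode_of_baseIn {im : Image} {N sz : Nat} (hI : ImageIsNat im N sz) (hb : BaseIn N sz) (c : Nat) (hc : c = 0 ∨ c = 3)
    (inp : List UInt8) : Closed.AllCode (startLayout c hc) (startU im c inp) where
  abs := hasCode_of_baseIn hI hb c hc inp baseHas_abs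
  arena_poison := hasCode_of_baseIn hI hb c hc inp baseHas_arena_poison
  arena_unpoison := hasCode_of_baseIn hI hb c hc inp baseHas_arena_unpoison
  asan_load1_noabort := hasCode_of_baseIn hI hb c hc inp baseHas_asan_load1_noabort
  asan_load2_noabort := hasCode_of_baseIn hI hb c hc inp baseHas_asan_load2_noabort
  asan_load4_noabort := hasCode_of_baseIn hI hb c hc inp baseHas_asan_load4_noabort
  asan_load8_noabort := hasCode_of_baseIn hI hb c hc inp baseHas_asan_load8_noabort
  asan_store1_noabort := hasCode_of_baseIn hI hb c hc inp baseHas_asan_store1_noabort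
  asan_store2_noabort := hasCode_of_baseIn hI hb c hc inp baseHas_asan_store2_noabort
  asan_store4_noabort := hasCode_of_baseIn hI hb c hc inp baseHas_asan_store4_noabort
  asan_store8_noabort := hasCode_of_baseIn hI hb c hc inp baseHas_asan_store8_noabort
  cos_poly := hasCode_of_baseIn hI hb c hc inp baseHas_cos_poly
  floor := hasCode_of_baseIn hI hb c hc inp baseHas_floor
  heap_alloc := hasCode_of_baseIn hI hb c hc inp baseHas_heap_alloc
  heap_live_size := hasCode_of_baseIn hI hb c hc inp baseHas_heap_live_size
  heap_product_ok := hasCode_of_baseIn hI hb c hc inp baseHas_heap_product_ok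
  malloc := hasCode_of_baseIn hI hb c hc inp baseHas_malloc
  memcmp := hasCode_of_baseIn hI hb c hc inp baseHas_memcmp
  memcpy := hasCode_of_baseIn hI hb c hc inp baseHas_memcpy
  memset := hasCode_of_baseIn hI hb c hc inp baseHas_memset
  pow_int := hasCode_of_baseIn hI hb c hc inp baseHas_pow_int
  range_bad := hasCode_of_baseIn hI hb c hc inp baseHas_range_bad
  sin_poly := hasCode_of_baseIn hI hb c hc inp baseHas_sin_poly
  sincos_quadrant := hasCode_of_baseIn hI hb c hc inp baseHas_sincos_quadrant
  swap_bytes := hasCode_of_baseIn hI hb c hc inp baseHas_swap_bytes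
  two_to := hasCode_of_baseIn hI hb c hc inp baseHas_two_to
  asan_load16_noabort := hasCode_of_baseIn hI hb c hc inp baseHas_asan_load16_noabort
  asan_loadN_noabort := hasCode_of_baseIn hI hb c hc inp baseHas_asan_loadN_noabort
  asan_store16_noabort := hasCode_of_baseIn hI hb c hc inp baseHas_asan_store16_noabort
  asan_storeN_noabort := hasCode_of_baseIn hI hb c hc inp baseHas_asan_storeN_noabort
  calloc := hasCode_of_baseIn hI hb c hc inp baseHas_calloc
  cos := hasCode_of_baseIn hI hb c hc inp baseHas_cos
  free := hasCode_of_baseIn hI hb c hc inp baseHas_free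
  ldexp := hasCode_of_baseIn hI hb c hc inp baseHas_ldexp
  log := hasCode_of_baseIn hI hb c hc inp baseHas_log
  realloc := hasCode_of_baseIn hI hb c hc inp baseHas_realloc
  reallocarray := hasCode_of_baseIn hI hb c hc inp baseHas_reallocarray
  sift_down := hasCode_of_baseIn hI hb c hc inp baseHas_sift_down
  sin := hasCode_of_baseIn hI hb c hc inp baseHas_sin
  exp := hasCode_of_baseIn hI hb c hc inp baseHas_exp
  pow := hasCode_of_baseIn hI hb c hc inp baseHas_pow
  qsort := hasCode_of_baseIn hI hb c hc inp baseHas_qsort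

end ProgX.Base
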